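-- pv_equiv track=rewrite | github.com/zeke-sys/AlgoRepo | 3104HW8.py | part_of_a_cycle
-- ===== SOURCE A (Python) =====
-- def part_of_a_cycle(a, j):
--     n = len(a)
--     if j < 0 or j >= n:
--         return False
--     color = [0] * n  # 0=white,1=gray,2=black
--     parent = [-1] * n
--     found = [False]  # flag to stop early if cycle containing j found
--
--     def visit(u):
--         if found[0]:
--             return
--         color[u] = 1
--         for v in a[u]:
--             if found[0]:
--                 return
--             if not (0 <= v < n):
--                 continue
--             if color[v] == 0:
--                 parent[v] = u
--                 visit(v)
--             elif color[v] == 1: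
--                 # back edge u -> v found, cycle exists
--                 # collect nodes on stack from u back to v
--                 x = u
--                 cycle_nodes = {v}
--                 while x != v and x != -1:
--                     cycle_nodes.add(x)
--                     x = parent[x]
--                 # check if j is in this cycle
--                 if j in cycle_nodes:
--                     found[0] = True
--                     return
--         color[u] = 2
--
--     for i in range(n):
--         if color[i] == 0:
--             visit(i)
--         if found[0]:
--             return True
--     return False
-- ===== SOURCE B (Python) =====
-- def part_of_a_cycle(a, j):
--     n = len(a)
--     if not (0 <= j < n):
--         return False
--     done = set()  # finished ("black") nodes
--
--     def dfs(u, path):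
--         # path: the active gray chain above u's caller (immutable; u appended here)
--         path = path + [u]
--         for v in a[u]:
--             if 0 <= v < n and v not in done:
--                 if v in path:
--                     # back edge: the active cycle is the suffix of path from v
--                     if j in path[path.index(v):]:
--                         return True
--                 elif dfs(v, path):
--                     return True
--         done.add(u)
--         return False
--
--     return any(dfs(i, []) for i in range(n) if i not in done)
-- ===== Notes on version B (the rewrite author's own statement) =====
-- stated objective: alternative
-- what changed: B drops A's color/parent arrays and found-flag entirely: it threads an immutable gray-path list and a finished-node set through a Boolean-returning DFS, and tests j on a back-edge cycle by membership in the path suffix path[path.index(v):] instead of A's parent-pointer walk that rebuilds the cycle as a set.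
import Mathlib
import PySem

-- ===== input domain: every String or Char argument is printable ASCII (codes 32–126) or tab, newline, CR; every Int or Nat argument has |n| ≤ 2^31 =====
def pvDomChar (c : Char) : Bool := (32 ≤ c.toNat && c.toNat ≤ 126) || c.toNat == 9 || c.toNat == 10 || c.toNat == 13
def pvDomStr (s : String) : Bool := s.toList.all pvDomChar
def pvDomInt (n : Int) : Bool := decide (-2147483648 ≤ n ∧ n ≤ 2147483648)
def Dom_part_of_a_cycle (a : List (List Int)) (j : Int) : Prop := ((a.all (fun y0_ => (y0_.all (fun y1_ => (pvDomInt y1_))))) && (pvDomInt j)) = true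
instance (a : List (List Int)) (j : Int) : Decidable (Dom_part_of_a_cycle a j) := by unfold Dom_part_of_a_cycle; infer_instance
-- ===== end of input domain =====

-- B drops A's color/parent arrays and found-flag: it threads an immutable gray-path list and a
-- finished-node set through a Boolean-returning DFS, and tests j on a back-edge cycle by
-- membership in the path suffix path[path.index(v):] instead of A's parent-pointer walk that
-- rebuilds the cycle as a set (an alternative formulation; same asymptotic cost).

-- in-range list read / write (Python l[i] and l[i] = x; A only uses them at indices
-- 0 ≤ i < len(l), where PySem.List.pyGetD / pySetD are exact)
def getI (l : List Int) (i : Int) : Int := PySem.List.pyGetD l i 0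
def setI (l : List Int) (i : Int) (x : Int) : List Int := PySem.List.pySetD l i x

-- ===== PORT A =====

structure SA where
  color : List Int
  parent : List Int
  found : Bool
deriving Repr, DecidableEq

-- the 'while x != v and x != -1' walk collecting cycle_nodes (fuel bounds the chain length;
-- a.length + 1 is enough because the parent chain stays inside the duplicate-free gray stack)
def collectA (parent : List Int) (v : Int) : Nat → Int → PySem.Set Int → PySem.Set Int
  | 0, _, s => s
  | f+1, x, s =>
    if x ≠ v ∧ x ≠ -1 then collectA parent v f (getI parent x) (PySem.Set.add s x) else s

mutual
-- def visit(u) of A (fuel bounds the recursion depth, which is at most n)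
def visitA (a : List (List Int)) (n j : Int) (f : Nat) (u : Int) (st : SA) : SA :=
  match f with
  | 0 => st
  | f+1 =>
    if st.found then st
    else
      let st1 : SA := { st with color := setI st.color u 1 }
      let r := goA a n j f u (PySem.List.pyGetD a u []) st1
      if r.2 then r.1 else { r.1 with color := setI r.1.color u 2 }
termination_by (f, 0)

-- the 'for v in a[u]' loop of visit; the Bool records whether the loop exited by `return`
def goA (a : List (List Int)) (n j : Int) (f : Nat) (u : Int) (vs : List Int) (st : SA) : SA × Bool :=
  match vs with
  | [] => (st, false)
  | v :: vs =>
    if st.found then (st, true)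
    else if ¬ (0 ≤ v ∧ v < n) then goA a n j f u vs st
    else if getI st.color v = 0 then
      goA a n j f u vs (visitA a n j f v { st with parent := setI st.parent v u })
    else if getI st.color v = 1 then
      let cyc := collectA st.parent v (a.length + 1) u (PySem.Set.ofList [v])
      if PySem.Set.contains cyc j then ({ st with found := true }, true)
      else goA a n j f u vs st
    else goA a n j f u vs st
termination_by (f, vs.length + 1)
end

-- the top-level 'for i in range(n)' loop of A
def loopA (a : List (List Int)) (n j : Int) (idxs : List Int) (st : SA) : Bool :=
  match idxs with
  | [] => false
  | i :: is =>
    let st1 := if getI st.color i = 0 then visitA a n j (a.length + 1) i st else st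
    if st1.found then true else loopA a n j is st1

def part_of_a_cycle (a : List (List Int)) (j : Int) : Bool :=
  let n : Int := a.length
  if j < 0 ∨ j ≥ n then false
  else loopA a n j (PySem.List.pyRange 0 n 1)
    { color := List.replicate a.length 0, parent := List.replicate a.length (-1), found := false }

-- ===== PORT B =====

mutual
-- def dfs(u, path) of B: returns (done-set after the call, cycle-with-j-found?);
-- fuel bounds the recursion depth, which is at most n
def dfsB (a : List (List Int)) (n j : Int) (f : Nat) (u : Int) (path : List Int)
    (done : PySem.Set Int) : PySem.Set Int × Bool :=
  match f with
  | 0 => (done, false)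
  | f+1 =>
    let p := path ++ [u]
    let r := edgesB a n j f (PySem.List.pyGetD a u []) p done
    if r.2 then r else (PySem.Set.add r.1 u, false)
termination_by (f, 0)

-- the 'for v in a[u]' loop of B's dfs
def edgesB (a : List (List Int)) (n j : Int) (f : Nat) (vs : List Int) (p : List Int)
    (done : PySem.Set Int) : PySem.Set Int × Bool :=
  match vs with
  | [] => (done, false)
  | v :: vs =>
    if 0 ≤ v ∧ v < n ∧ ¬ v ∈ done then
      if v ∈ p then
        -- j in path[path.index(v):]
        if j ∈ PySem.List.slice p (some (((PySem.List.index? p v).getD 0 : Nat) : Int)) none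
        then (done, true)
        else edgesB a n j f vs p done
      else
        let r := dfsB a n j f v p done
        if r.2 then r else edgesB a n j f vs p r.1
    else edgesB a n j f vs p done
termination_by (f, vs.length + 1)
end

-- 'any(dfs(i, []) for i in range(n) if i not in done)'
def anyB (a : List (List Int)) (n j : Int) (idxs : List Int) (done : PySem.Set Int) : Bool :=
  match idxs with
  | [] => false
  | i :: is =>
    if ¬ i ∈ done then
      let r := dfsB a n j (a.length + 1) i [] done
      if r.2 then true else anyB a n j is r.1
    else anyB a n j is done

def part_of_a_cycle_alt (a : List (List Int)) (j : Int) : Bool :=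
  let n : Int := a.length
  if ¬ (0 ≤ j ∧ j < n) then false
  else anyB a n j (PySem.List.pyRange 0 n 1) PySem.Set.empty

-- ===== PRECONDITION & SPEC =====

def Spec_part_of_a_cycle (a : List (List Int)) (j : Int) (out : Bool) : Prop :=
  out = part_of_a_cycle_alt a j
instance (a : List (List Int)) (j : Int) (out : Bool) : Decidable (Spec_part_of_a_cycle a j out) := by
  unfold Spec_part_of_a_cycle; infer_instance

-- ===== CLAIM =====

def Claim_equal_part_of_a_cycle : Prop :=
  ∀ (a : List (List Int)) (j : Int), Dom_part_of_a_cycle a j →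
    Spec_part_of_a_cycle a j (part_of_a_cycle a j)

-- ===== LEMMAS AND PROOFS =====

-- the simulation invariant: q is the current gray DFS stack (in order); A's found flag is off,
-- A's gray nodes are exactly q, A's black nodes are exactly B's done set, and A's parent links
-- chain q
def DfsInv (nn : Nat) (q : List Int) (sa : SA) (done : PySem.Set Int) : Prop :=
  sa.found = false ∧
  sa.color.length = nn ∧ sa.parent.length = nn ∧
  q.Nodup ∧ (∀ x ∈ q, 0 ≤ x ∧ x < (nn : Int)) ∧
  (∀ x : Int, 0 ≤ x → x < (nn : Int) → (getI sa.color x = 1 ↔ x ∈ q)) ∧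
  (∀ x : Int, 0 ≤ x → x < (nn : Int) → (getI sa.color x = 2 ↔ x ∈ done)) ∧
  (∀ x : Int, 0 ≤ x → x < (nn : Int) →
    getI sa.color x = 0 ∨ getI sa.color x = 1 ∨ getI sa.color x = 2) ∧
  (∀ k : Nat, (h : k + 1 < q.length) → getI sa.parent (q[k+1]) = q[k])

-- ----- small facts about getI / setI -----

lemma length_setI (l : List Int) (i x : Int) : (setI l i x).length = l.length :=
  PySem.List.length_pySetD l i x

lemma setI_eq (l : List Int) (i x : Int) (h : 0 ≤ i) : setI l i x = l.set i.toNat x := by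
  unfold setI; exact PySem.List.pySetD_of_nonneg l x h

lemma getI_eq (l : List Int) (i : Int) (h0 : 0 ≤ i) (h1 : i < l.length) :
    getI l i = l[i.toNat]'(by omega) := by
  unfold getI; exact PySem.List.pyGetD_eq_getElem l 0 h0 (by exact_mod_cast h1)

lemma getI_setI_self (l : List Int) (i x : Int) (h0 : 0 ≤ i) (h1 : i < l.length) :
    getI (setI l i x) i = x := by
  rw [setI_eq l i x h0, getI_eq _ i h0 (by simp; omega)]
  simp

lemma getI_setI_ne (l : List Int) (i x i' : Int) (h0 : 0 ≤ i) (h0' : 0 ≤ i')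
    (h1' : i' < l.length) (hne : i' ≠ i) : getI (setI l i x) i' = getI l i' := by
  rw [setI_eq l i x h0, getI_eq _ i' h0' (by simp; omega), getI_eq l i' h0' h1']
  rw [List.getElem_set_ne]
  omega

lemma getI_replicate (nn : Nat) (i : Int) (h0 : 0 ≤ i) (h1 : i < (nn : Int)) :
    getI (List.replicate nn (0 : Int)) i = 0 := by
  rw [getI_eq _ i h0 (by simp; omega)]
  simp

-- ----- a duplicate-free list of ints in [0, nn) has length at most nn -----

lemma stack_len_le (q : List Int) (nn : Nat) (hnd : q.Nodup)
    (hr : ∀ x ∈ q, 0 ≤ x ∧ x < (nn : Int)) : q.length ≤ nn := by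
  have hsub : q.toFinset ⊆ Finset.Ico (0 : Int) nn := by
    intro x hx
    rw [List.mem_toFinset] at hx
    rcases hr x hx with ⟨h1, h2⟩
    simp [Finset.mem_Ico]
    exact ⟨h1, h2⟩
  have := Finset.card_le_card hsub
  rw [List.toFinset_card_of_nodup hnd, Int.card_Ico] at this
  omega

-- ----- goA is frozen once found is set -----

lemma goA_found (a : List (List Int)) (n j : Int) (f : Nat) (u : Int) (vs : List Int)
    (st : SA) (h : st.found = true) : (goA a n j f u vs st).1 = st := by
  cases vs <;> simp [goA, h]

-- ----- the parent walk collects exactly the stack segment above v -----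

lemma collect_spec (parent : List Int) (r : List Int)
    (hnd : r.Nodup) (hpos : ∀ x ∈ r, 0 ≤ x)
    (hchain : ∀ k : Nat, (h : k + 1 < r.length) → getI parent (r[k+1]) = r[k])
    (iv : Nat) (hiv : iv < r.length) :
    ∀ (fl : Nat) (k : Nat) (hk : k < r.length) (hivk : iv ≤ k) (hf : k - iv < fl)
      (s : PySem.Set Int) (x : Int),
      (x ∈ collectA parent (r[iv]) fl (r[k]) s ↔
        x ∈ s ∨ ∃ i : Nat, iv < i ∧ i ≤ k ∧ r[i]? = some x) := by
  intro fl
  induction fl with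
  | zero => intro k _hk _hivk hf; omega
  | succ f ih =>
    intro k hk hivk hf s x
    by_cases hkiv : k = iv
    · subst hkiv
      simp [collectA]
      intro i h1 h2
      omega
    · have hne : r[k] ≠ r[iv] := by
        intro h
        rw [List.Nodup.getElem_inj_iff hnd] at h
        omega
      have hneg : r[k] ≠ -1 := by
        have := hpos (r[k]) (List.getElem_mem hk)
        omega
      have hstep : collectA parent (r[iv]) (f + 1) (r[k]) s =
          collectA parent (r[iv]) f (getI parent (r[k])) (PySem.Set.add s (r[k])) := by
        rw [collectA]
        simp [hne, hneg]
      have hc := hchain (k - 1) (by omega)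
      have hkk : k - 1 + 1 = k := by omega
      simp only [hkk] at hc
      rw [hstep, hc, ih (k - 1) (by omega) (by omega) (by omega)]
      rw [PySem.Set.mem_add]
      constructor
      · rintro (⟨hx | hx⟩ | ⟨i, h1, h2, h3⟩)
        · exact Or.inl hx
        · exact Or.inr ⟨k, by omega, le_refl k, by rw [hx]; exact (List.getElem?_eq_getElem hk)⟩
        · exact Or.inr ⟨i, h1, by omega, h3⟩
      · rintro (hx | ⟨i, h1, h2, h3⟩)
        · exact Or.inl (Or.inl hx)
        · by_cases hik : i = k
          · subst hik
            rw [List.getElem?_eq_getElem hk] at h3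
            exact Or.inl (Or.inr (by injection h3 with h; omega))
          · exact Or.inr ⟨i, h1, by omega, h3⟩

-- ----- A's parent walk answers the same question as B's path-suffix membership test -----

lemma backedge (a : List (List Int)) (j : Int)
    (q : List Int) (u : Int) (sa : SA) (done : PySem.Set Int)
    (hInv : DfsInv a.length (q ++ [u]) sa done)
    (v : Int) (hmem : v ∈ q ++ [u]) :
    PySem.Set.contains (collectA sa.parent v (a.length + 1) u (PySem.Set.ofList [v])) j = true
      ↔ j ∈ PySem.List.slice (q ++ [u])
          (some (((PySem.List.index? (q ++ [u]) v).getD 0 : Nat) : Int)) none := by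
  obtain ⟨hfnd, lc, lp, hnd, hrange, hgrayc, hblackc, htri, hchain⟩ := hInv
  obtain ⟨k, hk⟩ := Option.isSome_iff_exists.mp
    ((PySem.List.index?_isSome_iff (q ++ [u]) v).mpr hmem)
  obtain ⟨hklt, hkv, _⟩ := PySem.List.getElem_of_index?_eq_some hk
  have hrlen : (q ++ [u]).length = q.length + 1 := by simp
  have hlen_le : (q ++ [u]).length ≤ a.length := stack_len_le _ _ hnd hrange
  have hu : (q ++ [u])[q.length]'(by omega) = u := List.getElem_concat_length rfl _
  rw [hk, Option.getD_some, PySem.List.slice_from_natCast]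
  rw [PySem.Set.contains_iff]
  have hx := collect_spec sa.parent (q ++ [u]) hnd (fun x hx => (hrange x hx).1) hchain k hklt
    (a.length + 1) q.length (by omega) (by omega) (by omega) (PySem.Set.ofList [v]) j
  rw [hkv, hu] at hx
  rw [hx, PySem.Set.mem_ofList]
  simp only [List.mem_singleton]
  have hdrop : ∀ (i : Nat) (h : i < ((q ++ [u]).drop k).length),
      ((q ++ [u]).drop k)[i] = (q ++ [u])[k + i]'(by simp at h ⊢; omega) := by
    intro i h
    exact List.getElem_drop
  constructor
  · rintro (hjv | ⟨i, h1, h2, h3⟩)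
    · subst hjv
      have h0 : (0 : Nat) < ((q ++ [u]).drop k).length := by simp; omega
      have := hdrop 0 h0
      simp only [Nat.add_zero] at this
      rw [← hkv, ← this]
      exact List.getElem_mem h0
    · have hilt : i < (q ++ [u]).length := by omega
      rw [List.getElem?_eq_getElem hilt] at h3
      have hjeq : (q ++ [u])[i]'hilt = j := by injection h3
      have hik : i - k < ((q ++ [u]).drop k).length := by simp; omega
      have := hdrop (i - k) hik
      have hki : k + (i - k) = i := by omega
      rw [← hjeq]
      rw [show (q ++ [u])[i]'hilt = (q ++ [u])[k + (i - k)]'(by omega) from by congr 1; omega]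
      rw [← this]
      exact List.getElem_mem hik
  · intro hjd
    obtain ⟨i, hi, hjeq⟩ := List.mem_iff_getElem.mp hjd
    rw [hdrop i hi] at hjeq
    simp only [List.length_drop] at hi
    by_cases hi0 : i = 0
    · left
      subst hi0
      rw [← hjeq, ← hkv]
      congr 1
    · right
      refine ⟨k + i, by omega, by omega, ?_⟩
      rw [List.getElem?_eq_getElem (by omega : k + i < (q ++ [u]).length), hjeq]

-- ----- the simulation statements, by DFS fuel -----

def VStmt (a : List (List Int)) (j : Int) (f : Nat) : Prop :=
  ∀ (u : Int) (q : List Int) (sa : SA) (done : PySem.Set Int),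
    DfsInv a.length q sa done → 0 ≤ u → u < (a.length : Int) → getI sa.color u = 0 →
    (∀ x : Int, q.getLast? = some x → getI sa.parent u = x) →
    (visitA a a.length j f u sa).found = (dfsB a a.length j f u q done).2 ∧
    ((dfsB a a.length j f u q done).2 = false →
      DfsInv a.length q (visitA a a.length j f u sa) (dfsB a a.length j f u q done).1)

def GStmt (a : List (List Int)) (j : Int) (f : Nat) : Prop :=
  ∀ (vs : List Int) (u : Int) (q : List Int) (sa : SA) (done : PySem.Set Int),
    DfsInv a.length (q ++ [u]) sa done →
    (goA a a.length j f u vs sa).1.found = (edgesB a a.length j f vs (q ++ [u]) done).2 ∧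
    ((goA a a.length j f u vs sa).2 = true → (goA a a.length j f u vs sa).1.found = true) ∧
    ((edgesB a a.length j f vs (q ++ [u]) done).2 = false →
      DfsInv a.length (q ++ [u]) (goA a a.length j f u vs sa).1
        (edgesB a a.length j f vs (q ++ [u]) done).1)

lemma sim_go (a : List (List Int)) (j : Int)
    (f : Nat) (hV : VStmt a j f) : GStmt a j f := by
  intro vs
  induction vs with
  | nil =>
    intro u q sa done hInv
    refine ⟨?_, ?_, fun _ => ?_⟩
    · simpa [goA, edgesB] using hInv.1
    · simp [goA]
    · simpa [goA, edgesB] using hInv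
  | cons v vs ih =>
    intro u q sa done hInv
    obtain ⟨hfnd, lc, lp, hnd, hrange, hgrayc, hblackc, htri, hchain⟩ := id hInv
    by_cases hv : (0 ≤ v ∧ v < (a.length : Int))
    · rcases htri v hv.1 hv.2 with hw | hg | hb
      · -- white: A sets parent[v] := u and recurses; B recurses with the longer path
        have hnq : v ∉ q ++ [u] := fun h => by
          have := (hgrayc v hv.1 hv.2).mpr h; omega
        have hnd' : v ∉ done := fun h => by
          have := (hblackc v hv.1 hv.2).mpr h; omega
        set sa1 : SA := { color := sa.color, parent := setI sa.parent v u, found := false }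
          with hsa1
        have hInv1 : DfsInv a.length (q ++ [u]) sa1 done := by
          refine ⟨rfl, lc, by simp [hsa1, length_setI, lp], hnd, hrange, hgrayc, hblackc,
            htri, ?_⟩
          intro k hk
          have hxmem : (q ++ [u])[k+1] ∈ q ++ [u] := List.getElem_mem hk
          have hxr := hrange _ hxmem
          have hxne : (q ++ [u])[k+1] ≠ v := fun h => hnq (h ▸ hxmem)
          rw [hsa1]
          simp only []
          rw [getI_setI_ne sa.parent v u _ hv.1 hxr.1 (by omega) hxne]
          exact hchain k hk
        have hpar1 : ∀ x : Int, (q ++ [u]).getLast? = some x → getI sa1.parent v = x := by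
          intro x hx
          simp at hx
          subst hx
          rw [hsa1]
          simp only []
          exact getI_setI_self sa.parent v u hv.1 (by omega)
        have hres := hV v (q ++ [u]) sa1 done hInv1 hv.1 hv.2 (by rw [hsa1]; exact hw) hpar1
        set rA := visitA a a.length j f v sa1 with hrA
        set rB := dfsB a a.length j f v (q ++ [u]) done with hrB
        have hstepA : goA a a.length j f u (v :: vs) sa = goA a a.length j f u vs rA := by
          rw [goA]
          simp only [hfnd, hv, hw, if_false, if_true, Bool.false_eq_true, and_self,
            not_true_eq_false]
          rw [hrA, hsa1]
        have hstepB : edgesB a a.length j f (v :: vs) (q ++ [u]) done =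
            (if rB.2 then rB else edgesB a a.length j f vs (q ++ [u]) rB.1) := by
          rw [edgesB]
          simp only [hv.1, hv.2, hnd', hnq, not_false_eq_true, and_true, if_true,
            if_false]
          rw [hrB]
        cases hr2 : rB.2 with
        | true =>
          have hfound : rA.found = true := by rw [hres.1, hr2]
          have hfrz : (goA a a.length j f u vs rA).1 = rA := goA_found a a.length j f u vs rA hfound
          rw [hstepA, hstepB]
          simp [hr2, hfrz, hfound]
        | false =>
          have hInv2 := hres.2 hr2
          rw [hstepA, hstepB]
          simp only [hr2, if_false, Bool.false_eq_true]
          exact ih u q rA rB.1 hInv2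
      · -- gray: back edge; A's collected cycle set vs B's path-suffix test
        have hmem : v ∈ q ++ [u] := (hgrayc v hv.1 hv.2).mp hg
        have hnd' : v ∉ done := fun h => by
          have := (hblackc v hv.1 hv.2).mpr h; omega
        have hbe := backedge a j q u sa done hInv v hmem
        by_cases hP : j ∈ PySem.List.slice (q ++ [u])
            (some (((PySem.List.index? (q ++ [u]) v).getD 0 : Nat) : Int)) none
        · have hcyc : j ∈ collectA sa.parent v (a.length + 1) u (PySem.Set.ofList [v]) :=
            (PySem.Set.contains_iff _ _).mp (hbe.mpr hP)
          have hstepA : goA a a.length j f u (v :: vs) sa =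
              ({ sa with found := true }, true) := by
            rw [goA]
            simp [hfnd, hv, hg, hcyc]
          have hstepB : edgesB a a.length j f (v :: vs) (q ++ [u]) done = (done, true) := by
            rw [edgesB, if_pos ⟨hv.1, hv.2, hnd'⟩, if_pos hmem, if_pos hP]
          rw [hstepA, hstepB]
          simp
        · have hcyc : ¬ j ∈ collectA sa.parent v (a.length + 1) u (PySem.Set.ofList [v]) := by
            rw [← PySem.Set.contains_iff _ _, hbe]; exact hP
          have hstepA : goA a a.length j f u (v :: vs) sa = goA a a.length j f u vs sa := by
            rw [goA]
            simp [hfnd, hv, hg, hcyc]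
          have hstepB : edgesB a a.length j f (v :: vs) (q ++ [u]) done =
              edgesB a a.length j f vs (q ++ [u]) done := by
            rw [edgesB, if_pos ⟨hv.1, hv.2, hnd'⟩, if_pos hmem, if_neg hP]
          rw [hstepA, hstepB]
          exact ih u q sa done hInv
      · -- black: both skip
        have hdn : v ∈ done := (hblackc v hv.1 hv.2).mp hb
        have hstepA : goA a a.length j f u (v :: vs) sa = goA a a.length j f u vs sa := by
          rw [goA]
          simp [hfnd, hv, show getI sa.color v ≠ 0 from by omega,
            show getI sa.color v ≠ 1 from by omega]
        have hstepB : edgesB a a.length j f (v :: vs) (q ++ [u]) done =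
            edgesB a a.length j f vs (q ++ [u]) done := by
          rw [edgesB, if_neg (by tauto : ¬ (0 ≤ v ∧ v < (a.length : Int) ∧ ¬ v ∈ done))]
        rw [hstepA, hstepB]
        exact ih u q sa done hInv
    · have hstepA : goA a a.length j f u (v :: vs) sa = goA a a.length j f u vs sa := by
        rw [goA]
        simp [hfnd, hv]
      have hstepB : edgesB a a.length j f (v :: vs) (q ++ [u]) done =
          edgesB a a.length j f vs (q ++ [u]) done := by
        rw [edgesB]
        simp only [if_neg (by tauto : ¬ (0 ≤ v ∧ v < (a.length : Int) ∧ ¬ v ∈ done))]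
      rw [hstepA, hstepB]
      exact ih u q sa done hInv

lemma sim_visit0 (a : List (List Int)) (j : Int) : VStmt a j 0 := by
  intro u q sa done hInv hu0 hu1 hw hpar
  refine ⟨?_, fun _ => ?_⟩
  · simpa [visitA, dfsB] using hInv.1
  · simpa [visitA, dfsB] using hInv

lemma sim_visit (a : List (List Int)) (j : Int) (f : Nat) (hG : GStmt a j f) :
    VStmt a j (f + 1) := by
  intro u q sa done hInv hu0 hu1 hw hpar
  obtain ⟨hfnd, lc, lp, hnd, hrange, hgrayc, hblackc, htri, hchain⟩ := id hInv
  have huq : u ∉ q := fun h => by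
    have := (hgrayc u hu0 hu1).mpr h; omega
  have hund : u ∉ done := fun h => by
    have := (hblackc u hu0 hu1).mpr h; omega
  set sa1 : SA := { color := setI sa.color u 1, parent := sa.parent, found := false } with hsa1
  have hInv1 : DfsInv a.length (q ++ [u]) sa1 done := by
    refine ⟨rfl, by simp [hsa1, length_setI, lc], lp, ?_, ?_, ?_, ?_, ?_, ?_⟩
    · simp [List.nodup_append, hnd]
      exact fun x hx h => huq (h ▸ hx)
    · intro x hx
      rcases List.mem_append.mp hx with hx | hx
      · exact hrange x hx
      · simp at hx
        subst hx
        exact ⟨hu0, hu1⟩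
    · intro x hx0 hx1
      rw [hsa1]
      simp only []
      by_cases hxu : x = u
      · subst hxu
        rw [getI_setI_self sa.color x 1 hx0 (by omega)]
        simp
      · rw [getI_setI_ne sa.color u 1 x hu0 hx0 (by omega) hxu]
        rw [hgrayc x hx0 hx1]
        simp [hxu]
    · intro x hx0 hx1
      rw [hsa1]
      simp only []
      by_cases hxu : x = u
      · subst hxu
        rw [getI_setI_self sa.color x 1 hx0 (by omega)]
        constructor
        · omega
        · intro h; exact absurd h hund
      · rw [getI_setI_ne sa.color u 1 x hu0 hx0 (by omega) hxu]
        exact hblackc x hx0 hx1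
    · intro x hx0 hx1
      rw [hsa1]
      simp only []
      by_cases hxu : x = u
      · subst hxu
        rw [getI_setI_self sa.color x 1 hx0 (by omega)]
        omega
      · rw [getI_setI_ne sa.color u 1 x hu0 hx0 (by omega) hxu]
        exact htri x hx0 hx1
    · intro k hk
      rw [hsa1]
      simp only []
      simp only [List.length_append, List.length_singleton] at hk
      by_cases hke : k + 1 < q.length
      · rw [List.getElem_append_left hke, List.getElem_append_left (by omega)]
        exact hchain k (by omega)
      · have hkq : k + 1 = q.length := by omega
        have h1 : (q ++ [u])[k+1]'(by simp; omega) = u := by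
          apply List.getElem_concat_length
          omega
        have hqne : q ≠ [] := by
          intro h
          rw [h] at hkq
          simp at hkq
        have h2 : (q ++ [u])[k]'(by simp; omega) = q[k]'(by omega) :=
          List.getElem_append_left (by omega)
        rw [h1, h2]
        apply hpar
        rw [List.getLast?_eq_getElem?,
          List.getElem?_eq_getElem (by omega : q.length - 1 < q.length)]
        simp only [show q.length - 1 = k from by omega]
  have hres := hG (PySem.List.pyGetD a u []) u q sa1 done hInv1
  set gA := goA a a.length j f u (PySem.List.pyGetD a u []) sa1 with hgA
  set gB := edgesB a a.length j f (PySem.List.pyGetD a u []) (q ++ [u]) done with hgB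
  have hstepA : visitA a a.length j (f + 1) u sa =
      (if gA.2 then gA.1 else { gA.1 with color := setI gA.1.color u 2 }) := by
    rw [visitA]
    simp only [hfnd, Bool.false_eq_true, if_false]
    rw [← hsa1]
  have hstepB : dfsB a a.length j (f + 1) u q done =
      (if gB.2 then gB else (PySem.Set.add gB.1 u, false)) := by
    rw [dfsB]
  cases hg2 : gB.2 with
  | true =>
    have hfound : gA.1.found = true := by rw [hres.1, hg2]
    refine ⟨?_, fun h => ?_⟩
    · rw [hstepA, hstepB]
      simp [hg2, hfound]
      split <;> simp [hfound]
    · rw [hstepB] at h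
      simp [hg2] at h
  | false =>
    have hAf : gA.1.found = false := by rw [hres.1, hg2]
    have hA2 : gA.2 = false := by
      cases h2 : gA.2
      · rfl
      · have := hres.2.1 h2
        rw [hAf] at this
        exact absurd this (by simp)
    have hInv2 := hres.2.2 hg2
    obtain ⟨hfnd2, lc2, lp2, hnd2, hrange2, hgrayc2, hblackc2, htri2, hchain2⟩ := id hInv2
    have hunq : u ∉ q := by
      have h := List.nodup_append.mp hnd2
      intro hx
      exact (by simpa using h.2.2 : ∀ y ∈ q, ¬ y = u) u hx rfl
    rw [hstepA, hstepB]
    simp only [hg2, hA2, Bool.false_eq_true, if_false]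
    refine ⟨hAf, fun _ => ?_⟩
    refine ⟨hAf, by simp [length_setI, lc2], lp2, (List.nodup_append.mp hnd2).1, ?_, ?_, ?_, ?_, ?_⟩
    · intro x hx
      exact hrange2 x (List.mem_append.mpr (Or.inl hx))
    · intro x hx0 hx1
      simp only []
      by_cases hxu : x = u
      · subst hxu
        rw [getI_setI_self gA.1.color x 2 hx0 (by omega)]
        constructor
        · omega
        · intro h
          exact absurd h hunq
      · rw [getI_setI_ne gA.1.color u 2 x hu0 hx0 (by omega) hxu]
        rw [hgrayc2 x hx0 hx1]
        simp [hxu]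
    · intro x hx0 hx1
      simp only []
      by_cases hxu : x = u
      · subst hxu
        rw [getI_setI_self gA.1.color x 2 hx0 (by omega)]
        simp [PySem.Set.mem_add]
      · rw [getI_setI_ne gA.1.color u 2 x hu0 hx0 (by omega) hxu]
        rw [hblackc2 x hx0 hx1, PySem.Set.mem_add]
        simp [hxu]
    · intro x hx0 hx1
      simp only []
      by_cases hxu : x = u
      · subst hxu
        rw [getI_setI_self gA.1.color x 2 hx0 (by omega)]
        omega
      · rw [getI_setI_ne gA.1.color u 2 x hu0 hx0 (by omega) hxu]
        exact htri2 x hx0 hx1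
    · intro k hk
      simp only []
      have h1 : (q ++ [u])[k+1]'(by simp; omega) = q[k+1]'(by omega) :=
        List.getElem_append_left (by omega)
      have h2 : (q ++ [u])[k]'(by simp; omega) = q[k]'(by omega) :=
        List.getElem_append_left (by omega)
      have := hchain2 k (by simp; omega)
      rw [h1, h2] at this
      exact this

lemma sim_all (a : List (List Int)) (j : Int) :
    ∀ f : Nat, VStmt a j f := by
  intro f
  induction f with
  | zero => exact sim_visit0 a j
  | succ f ih => exact sim_visit a j f (sim_go a j f ih)

lemma sim_loop (a : List (List Int)) (j : Int) :
    ∀ (idxs : List Int) (sa : SA) (done : PySem.Set Int), DfsInv a.length [] sa done →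
      (∀ i ∈ idxs, 0 ≤ i ∧ i < (a.length : Int)) →
      loopA a a.length j idxs sa = anyB a a.length j idxs done := by
  intro idxs
  induction idxs with
  | nil => intro sa done _ _; simp [loopA, anyB]
  | cons i is ih =>
    intro sa done hInv hok
    obtain ⟨hfnd, lc, lp, hnd, hrange, hgrayc, hblackc, htri, hchain⟩ := id hInv
    have hi := hok i (List.mem_cons_self)
    by_cases hw : getI sa.color i = 0
    · have hwb : ¬ i ∈ done := fun h => by
        have := (hblackc i hi.1 hi.2).mpr h; omega
      have hres := sim_all a j (a.length + 1) i [] sa done hInv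
        hi.1 hi.2 hw (by intro x hx; simp at hx)
      set rA := visitA a a.length j (a.length + 1) i sa with hrA
      set rB := dfsB a a.length j (a.length + 1) i [] done with hrB
      have hstepA : loopA a a.length j (i :: is) sa =
          (if rA.found then true else loopA a a.length j is rA) := by
        rw [loopA]
        simp [hw, ← hrA]
      have hstepB : anyB a a.length j (i :: is) done =
          (if rB.2 then true else anyB a a.length j is rB.1) := by
        rw [anyB]
        simp only [hwb, not_false_eq_true, if_true]
        rw [← hrB]
      rw [hstepA, hstepB, hres.1]
      cases hr2 : rB.2 with
      | true => simp
      | false =>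
        simp only [Bool.false_eq_true, if_false]
        exact ih rA rB.1 (hres.2 hr2) (fun x hx => hok x (List.mem_cons_of_mem i hx))
    · have hblk : getI sa.color i = 2 := by
        rcases htri i hi.1 hi.2 with h | h | h
        · omega
        · exact absurd ((hgrayc i hi.1 hi.2).mp h) (by simp)
        · exact h
      have hwb : i ∈ done := (hblackc i hi.1 hi.2).mp hblk
      have hstepA : loopA a a.length j (i :: is) sa = loopA a a.length j is sa := by
        rw [loopA]
        simp [hw, hfnd]
      have hstepB : anyB a a.length j (i :: is) done = anyB a a.length j is done := by
        rw [anyB]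
        simp [hwb]
      rw [hstepA, hstepB]
      exact ih sa done hInv (fun x hx => hok x (List.mem_cons_of_mem i hx))

-- ===== VERDICT =====

theorem part_of_a_cycle_spec : Claim_equal_part_of_a_cycle := by
  unfold Claim_equal_part_of_a_cycle
  intro a j _hdom
  unfold Spec_part_of_a_cycle part_of_a_cycle part_of_a_cycle_alt
  by_cases hj : 0 ≤ j ∧ j < (a.length : Int)
  · rw [if_neg (by omega : ¬ (j < 0 ∨ j ≥ (a.length : Int))), if_neg (by simpa using hj)]
    apply sim_loop a j
    · refine ⟨rfl, by simp, by simp, List.nodup_nil, by simp, ?_, ?_, ?_, ?_⟩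
      · intro x hx0 hx1
        rw [getI_replicate a.length x hx0 hx1]
        simp
      · intro x hx0 hx1
        rw [getI_replicate a.length x hx0 hx1]
        simp [PySem.Set.empty]
      · intro x hx0 hx1
        rw [getI_replicate a.length x hx0 hx1]
        omega
      · intro k hk
        simp at hk
    · intro i hi
      rw [PySem.List.mem_pyRange_one] at hi
      exact hi
  · rw [if_pos (by omega : j < 0 ∨ j ≥ (a.length : Int)), if_pos (by simpa using hj)]
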